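-- pv_equiv track=rewrite | github.com/JakeSaunders1995/comp16321MarkingMid | CW_encrypt/decrypt_m08320mm.py | morseTextToList
-- ===== SOURCE A (Python) =====
-- def morseSwapper(morse):
--     switcher = { #assigns each combination in morse code with the correct letter
--         "/" : " ", ".-": "a", "-..." : "b", "-.-.": "c", "-.." : "d", ".": "e",
--         "..-." : "f", "--.": "g", "...." : "h", "..": "i", ".---" : "j", "-.-": "k",
--         ".-.." : "l", "--": "m", "-." : "n", "---": "o", "..--." : "p", "--.-": "q",
--         ".-." : "r", "...": "s", "-" : "t", "..-": "u", "...-" : "v", ".--": "w",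
--         "-..-" : "x", "-.--": "y", "--.." : "z"
--     }
--     try: #in case of unexpected inputs
--         return switcher[morse]
--     except:
--         return "(Null)"
--
-- def morseTextToList(morse):
--     letter = str()
--     allLetters = str()
--     for i in range(len(morse)): #divides input text into characters using spaces
--         if(morse[i]==" "):
--             allLetters+=morseSwapper(letter)
--             letter = str()
--         elif morse[i]!="\n": #avoiding any new lines
--             letter = letter + morse[i]
--     allLetters+=morseSwapper(letter) #gets final character
--     return allLetters
-- ===== SOURCE B (Python) =====
-- _CODES = ("/ .- -... -.-. -.. . ..-. --. .... .. .--- -.- .-.. -- -. --- "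
--           "..--. --.- .-. ... - ..- ...- .-- -..- -.-- --..").split(" ")
-- _LETTERS = " abcdefghijklmnopqrstuvwxyz"
-- _MORSE = dict(zip(_CODES, _LETTERS))
--
-- def morseTextToList(morse):
--     # strip newlines once, split on single spaces (keeping empty tokens), look up, join
--     return "".join(_MORSE.get(tok, "(Null)") for tok in morse.replace("\n", "").split(" "))
-- ===== Notes on version B (the rewrite author's own statement) =====
-- stated objective: idiomatic
-- what changed: Replaces A's char-by-char index loop with a stateful letter accumulator and hand-written 27-entry dict literal by an idiomatic pipeline: a decode table built once with dict(zip(...)) from a codes string and a letters string, then strip newlines with replace, tokenize with an explicit-separator split that keeps empty tokens, look each token up with dict.get and a default, and join the results.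
import Mathlib
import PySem

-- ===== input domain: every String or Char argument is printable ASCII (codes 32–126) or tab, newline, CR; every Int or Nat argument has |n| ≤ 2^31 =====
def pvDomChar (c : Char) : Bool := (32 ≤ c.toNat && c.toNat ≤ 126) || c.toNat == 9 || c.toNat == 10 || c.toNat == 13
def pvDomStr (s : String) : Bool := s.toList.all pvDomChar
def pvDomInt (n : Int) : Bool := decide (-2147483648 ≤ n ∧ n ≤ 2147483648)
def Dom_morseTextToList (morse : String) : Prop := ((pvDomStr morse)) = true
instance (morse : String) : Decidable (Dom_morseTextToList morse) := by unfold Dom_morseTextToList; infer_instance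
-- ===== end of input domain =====

-- B replaces A's char-by-char stateful accumulator and hand-written dict literal by an
-- idiomatic pipeline: a table built once from dict(zip(codes.split(" "), letters)),
-- then strip newlines / split on ' ' / look up / join (simpler decomposition, same cost).

-- ===== PORT A =====
-- A's helper morseSwapper: Python dict literal as an association list (first-match lookup), KeyError -> "(Null)"
def pvSwitcher : List (List Char × List Char) :=
  [("/".toList, " ".toList), (".-".toList, "a".toList), ("-...".toList, "b".toList),
   ("-.-.".toList, "c".toList), ("-..".toList, "d".toList), (".".toList, "e".toList),
   ("..-.".toList, "f".toList), ("--.".toList, "g".toList), ("....".toList, "h".toList),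
   ("..".toList, "i".toList), (".---".toList, "j".toList), ("-.-".toList, "k".toList),
   (".-..".toList, "l".toList), ("--".toList, "m".toList), ("-.".toList, "n".toList),
   ("---".toList, "o".toList), ("..--.".toList, "p".toList), ("--.-".toList, "q".toList),
   (".-.".toList, "r".toList), ("...".toList, "s".toList), ("-".toList, "t".toList),
   ("..-".toList, "u".toList), ("...-".toList, "v".toList), (".--".toList, "w".toList),
   ("-..-".toList, "x".toList), ("-.--".toList, "y".toList), ("--..".toList, "z".toList)]

def morseSwapper (morse : List Char) : List Char :=
  match pvSwitcher.find? (fun p => p.1 == morse) with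
  | some p => p.2
  | none => "(Null)".toList

-- the loop body: flush `letter` on ' ', skip '\n', else extend `letter`
def pvFA (st : List Char × List Char) (c : Char) : List Char × List Char :=
  if c = ' ' then ([], st.2 ++ morseSwapper st.1)
  else if c ≠ '\n' then (st.1 ++ [c], st.2)
  else st

-- A: index loop over the characters; strings `letter`/`allLetters` carried as List Char (exact on code points)
def morseTextToList (morse : String) : String :=
  let st := morse.toList.foldl pvFA ([], [])
  String.mk (st.2 ++ morseSwapper st.1)

-- ===== PORT B =====
-- B's module constants: _CODES = "...".split(" "); _LETTERS; _MORSE = dict(zip(_CODES, _LETTERS))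
def pvCodes : List (List Char) :=
  PySem.Chars.splitOn ("/ .- -... -.-. -.. . ..-. --. .... .. .--- -.- .-.. -- -. --- ..--. --.- .-. ... - ..- ...- .-- -..- -.-- --..".toList) (" ".toList)

def pvLetters : List (List Char) := " abcdefghijklmnopqrstuvwxyz".toList.map (fun c => [c])

def pvMorse : PySem.Dict (List Char) (List Char) := PySem.Dict.ofList (pvCodes.zip pvLetters)

def morseTextToList_alt (morse : String) : String :=
  String.mk (PySem.Chars.join "".toList
    ((PySem.Chars.splitOn (PySem.Chars.replace morse.toList "\n".toList "".toList) " ".toList).map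
      (fun tok => pvMorse.getD tok "(Null)".toList)))

-- ===== PRECONDITION & SPEC =====
def Spec_morseTextToList (morse : String) (out : String) : Prop := out = morseTextToList_alt morse
instance (morse : String) (out : String) : Decidable (Spec_morseTextToList morse out) := by unfold Spec_morseTextToList; infer_instance

-- ===== CLAIM (what is proved, stated in full; the proofs are below) =====
def Claim_equal_morseTextToList : Prop := ∀ (morse : String), Dom_morseTextToList morse → Spec_morseTextToList morse (morseTextToList morse)

-- ===== LEMMAS AND PROOFS =====

-- B's dict lookup coincides with A's morseSwapper on every token
theorem pvMorse_items : pvMorse.items = pvSwitcher := by decide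

theorem getD_mk_eq_find (l : List (List Char × List Char)) (t dflt : List Char) :
    (PySem.Dict.mk l).getD t dflt
      = (match l.find? (fun p => p.1 == t) with | some p => p.2 | none => dflt) := by
  induction l with
  | nil => simp [PySem.Dict.getD, PySem.Dict.get?, List.find?]
  | cons p ps ih =>
    by_cases h : p.1 = t
    · simp [PySem.Dict.getD, PySem.Dict.get?, List.find?, h]
    · have hb : (p.1 == t) = false := by simpa using h
      simp only [PySem.Dict.getD, PySem.Dict.get?, List.find?, hb] at *
      exact ih

theorem pvGet_eq_swapper (t : List Char) :
    pvMorse.getD t "(Null)".toList = morseSwapper t := by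
  have h : pvMorse = PySem.Dict.mk pvSwitcher := by
    apply PySem.Dict.ext; rw [pvMorse_items]
  rw [h, getD_mk_eq_find, morseSwapper]

-- tokenization spec: split on ' ' keeping empty tokens, dropping '\n' (A's combined rule)
def pvToks : List Char → List (List Char)
  | [] => [[]]
  | c :: cs =>
    if c = ' ' then [] :: pvToks cs
    else if c = '\n' then pvToks cs
    else match pvToks cs with
      | [] => [[c]]
      | t :: ts => (c :: t) :: ts

-- same without the '\n' rule (B applies it separately, via replace)
def pvToks0 : List Char → List (List Char)
  | [] => [[]]
  | c :: cs =>
    if c = ' ' then [] :: pvToks0 cs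
    else match pvToks0 cs with
      | [] => [[c]]
      | t :: ts => (c :: t) :: ts

def pvPre (p : List Char) : List (List Char) → List (List Char)
  | [] => [p]
  | t :: ts => (p ++ t) :: ts

theorem pvToks_ne_nil (cs : List Char) : pvToks cs ≠ [] := by
  induction cs with
  | nil => simp [pvToks]
  | cons c cs ih =>
    simp only [pvToks]
    split_ifs with h1 h2
    · simp
    · exact ih
    · cases h : pvToks cs <;> simp

theorem pvToks0_ne_nil (cs : List Char) : pvToks0 cs ≠ [] := by
  induction cs with
  | nil => simp [pvToks0]
  | cons c cs ih =>
    simp only [pvToks0]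
    split_ifs with h1
    · simp
    · cases h : pvToks0 cs <;> simp

theorem pvToks_eq_filter (cs : List Char) :
    pvToks cs = pvToks0 (cs.filter (fun c => c ≠ '\n')) := by
  induction cs with
  | nil => rfl
  | cons c cs ih =>
    by_cases hn : c = '\n'
    · subst hn
      simp [pvToks, List.filter, ih]
    · by_cases hs : c = ' '
      · subst hs
        simp [pvToks, List.filter, pvToks0, ih]
      · simp [pvToks, List.filter, hn, hs, pvToks0, ih]

theorem pvPre_nil_of_ne (l : List (List Char)) (h : l ≠ []) : pvPre [] l = l := by
  cases l with
  | nil => exact absurd rfl h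
  | cons t ts => simp [pvPre]

-- A's loop computes the flattened swap of the tokens
theorem pvLoopA (cs : List Char) : ∀ (letter acc : List Char),
    ((cs.foldl pvFA (letter, acc)).2 ++ morseSwapper (cs.foldl pvFA (letter, acc)).1)
      = acc ++ ((pvPre letter (pvToks cs)).map morseSwapper).flatten := by
  induction cs with
  | nil => intro letter acc; simp [pvToks, pvPre]
  | cons c cs ih =>
    intro letter acc
    by_cases hs : c = ' '
    · subst hs
      rw [List.foldl_cons, show pvFA (letter, acc) ' ' = ([], acc ++ morseSwapper letter) by
            simp [pvFA]]
      rw [ih [] (acc ++ morseSwapper letter)]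
      rw [pvPre_nil_of_ne _ (pvToks_ne_nil cs)]
      simp [pvToks, pvPre]
    · by_cases hn : c = '\n'
      · subst hn
        rw [List.foldl_cons, show pvFA (letter, acc) '\n' = (letter, acc) by simp [pvFA]]
        rw [ih letter acc]
        simp [pvToks]
      · rw [List.foldl_cons, show pvFA (letter, acc) c = (letter ++ [c], acc) by
            simp [pvFA, hs, hn]]
        rw [ih (letter ++ [c]) acc]
        have h := pvToks_ne_nil cs
        cases ht : pvToks cs with
        | nil => exact absurd ht h
        | cons t ts => simp [pvToks, hs, hn, ht, pvPre]

-- splitOn with a single-char separator computes pvToks0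
theorem pvSplitGo (l : List Char) : ∀ (fuel : Nat) (cur : List Char) (acc : List (List Char)),
    l.length < fuel →
    PySem.Chars.splitOn.go [' '] fuel l cur acc
      = acc.reverse ++ pvPre cur.reverse (pvToks0 l) := by
  induction l with
  | nil =>
    intro fuel cur acc hf
    cases fuel with
    | zero => omega
    | succ m => simp [PySem.Chars.splitOn.go, pvToks0, pvPre]
  | cons c rest ih =>
    intro fuel cur acc hf
    cases fuel with
    | zero => omega
    | succ m =>
      by_cases hs : c = ' '
      · subst hs
        rw [show PySem.Chars.splitOn.go [' '] (m+1) (' ' :: rest) cur acc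
              = PySem.Chars.splitOn.go [' '] m rest [] (cur.reverse :: acc) by
            simp [PySem.Chars.splitOn.go, List.isPrefixOf]]
        rw [ih m [] (cur.reverse :: acc) (by simpa using hf)]
        simp only [List.reverse_nil]
        rw [pvPre_nil_of_ne _ (pvToks0_ne_nil rest)]
        simp [pvToks0, pvPre]
      · rw [show PySem.Chars.splitOn.go [' '] (m+1) (c :: rest) cur acc
              = PySem.Chars.splitOn.go [' '] m rest (c :: cur) acc by
            simp [PySem.Chars.splitOn.go, List.isPrefixOf]
            exact fun h => absurd h.symm hs]
        rw [ih m (c :: cur) acc (by simpa using hf)]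
        have h := pvToks0_ne_nil rest
        cases ht : pvToks0 rest with
        | nil => exact absurd ht h
        | cons t ts => simp [pvToks0, hs, ht, pvPre]

theorem pvSplit (s : List Char) : PySem.Chars.splitOn s [' '] = pvToks0 s := by
  have : PySem.Chars.splitOn s [' '] = PySem.Chars.splitOn.go [' '] (s.length + 1) s [] [] := rfl
  rw [this, pvSplitGo s (s.length + 1) [] [] (by omega)]
  simpa using pvPre_nil_of_ne _ (pvToks0_ne_nil s)

-- replace '\n' by '' is filter
theorem pvReplaceGo (l : List Char) : ∀ (fuel : Nat) (acc : List Char),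
    l.length ≤ fuel →
    PySem.Chars.replace.go ['\n'] [] fuel l acc
      = acc.reverse ++ l.filter (fun c => c ≠ '\n') := by
  induction l with
  | nil =>
    intro fuel acc hf
    cases fuel with
    | zero => simp [PySem.Chars.replace.go]
    | succ m => simp [PySem.Chars.replace.go]
  | cons c rest ih =>
    intro fuel acc hf
    cases fuel with
    | zero => simp at hf
    | succ m =>
      by_cases hn : c = '\n'
      · subst hn
        rw [show PySem.Chars.replace.go ['\n'] [] (m+1) ('\n' :: rest) acc
              = PySem.Chars.replace.go ['\n'] [] m rest acc by
            simp [PySem.Chars.replace.go, List.isPrefixOf]]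
        rw [ih m acc (by simpa using hf)]
        simp [List.filter]
      · rw [show PySem.Chars.replace.go ['\n'] [] (m+1) (c :: rest) acc
              = PySem.Chars.replace.go ['\n'] [] m rest (c :: acc) by
            simp [PySem.Chars.replace.go, List.isPrefixOf]
            exact fun h => absurd h.symm hn]
        rw [ih m (c :: acc) (by simpa using hf)]
        simp [List.filter, hn]

theorem pvReplace (s : List Char) :
    PySem.Chars.replace s "\n".toList "".toList = s.filter (fun c => c ≠ '\n') := by
  rw [show ("\n".toList) = ['\n'] from rfl, show ("".toList) = ([] : List Char) from rfl]
  rw [show PySem.Chars.replace s ['\n'] [] = PySem.Chars.replace.go ['\n'] [] s.length s [] by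
        simp [PySem.Chars.replace]]
  rw [pvReplaceGo s s.length [] le_rfl]
  simp

-- join with empty separator is flatten
theorem pvJoinNil (ps : List (List Char)) : PySem.Chars.join [] ps = ps.flatten := by
  induction ps with
  | nil => rfl
  | cons p ps ih =>
    cases ps with
    | nil => simp [PySem.Chars.join, List.intercalate]
    | cons q qs =>
      rw [PySem.Chars.join_cons_cons, ih]
      simp

-- ===== VERDICT (by name: the statement is the Claim_ definition above) =====
theorem morseTextToList_spec : Claim_equal_morseTextToList := by
  intro morse _
  show morseTextToList morse = morseTextToList_alt morse
  simp only [morseTextToList, morseTextToList_alt]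
  refine congrArg String.mk ?_
  rw [pvReplace, show (" ".toList) = [' '] from rfl, pvSplit,
      show ("".toList) = ([] : List Char) from rfl, pvJoinNil,
      show (fun tok => pvMorse.getD tok "(Null)".toList) = morseSwapper from funext pvGet_eq_swapper]
  have hA := pvLoopA morse.toList [] []
  rw [pvPre_nil_of_ne _ (pvToks_ne_nil morse.toList)] at hA
  simp only [List.nil_append] at hA
  rw [hA, pvToks_eq_filter]
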